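-- pv_equiv track=rewrite | github.com/hanyangii/BayesianNetwork | Calcurate_Posibility.py | cnt_p
-- ===== SOURCE A (Python) =====
-- def cnt_p(fea, TrainData, p_index, s_index):
-- 	p_num=0
-- 	s_num=0
-- 	for i in range(len(TrainData)):
-- 		t = TrainData[i]
-- 		p_num = p_num+1
-- 		temp=True
-- 		for j in range(len(p_index)):
-- 			if t[p_index[j]]!=fea[j]:
-- 				p_num = p_num-1
-- 				temp=False
-- 				break
-- 		if temp==True and t[s_index] == "1" : s_num = s_num+1
-- 	return s_num, p_num
-- ===== SOURCE B (Python) =====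
-- def cnt_p(fea, TrainData, p_index, s_index):
-- 	# Column-major elimination: refine a survivor-index set one pattern column at a time,
-- 	# instead of testing each row against the whole pattern.
-- 	survivors = list(range(len(TrainData)))
-- 	for j in range(len(p_index)):
-- 		survivors = [i for i in survivors if TrainData[i][p_index[j]] == fea[j]]
-- 	p_num = len(survivors)
-- 	s_num = 0
-- 	for i in survivors:
-- 		if TrainData[i][s_index] == "1":
-- 			s_num = s_num + 1
-- 	return s_num, p_num
-- ===== Notes on version B (the rewrite author's own statement) =====
-- stated objective: alternative
-- what changed: Replaces A's row-major single pass (each row tested against the whole pattern with a break flag and counter-decrement) by column-major elimination: a survivor list of row indices is refined one pattern column at a time, then p_num is its length and s_num is counted over the survivors.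
import Mathlib
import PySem

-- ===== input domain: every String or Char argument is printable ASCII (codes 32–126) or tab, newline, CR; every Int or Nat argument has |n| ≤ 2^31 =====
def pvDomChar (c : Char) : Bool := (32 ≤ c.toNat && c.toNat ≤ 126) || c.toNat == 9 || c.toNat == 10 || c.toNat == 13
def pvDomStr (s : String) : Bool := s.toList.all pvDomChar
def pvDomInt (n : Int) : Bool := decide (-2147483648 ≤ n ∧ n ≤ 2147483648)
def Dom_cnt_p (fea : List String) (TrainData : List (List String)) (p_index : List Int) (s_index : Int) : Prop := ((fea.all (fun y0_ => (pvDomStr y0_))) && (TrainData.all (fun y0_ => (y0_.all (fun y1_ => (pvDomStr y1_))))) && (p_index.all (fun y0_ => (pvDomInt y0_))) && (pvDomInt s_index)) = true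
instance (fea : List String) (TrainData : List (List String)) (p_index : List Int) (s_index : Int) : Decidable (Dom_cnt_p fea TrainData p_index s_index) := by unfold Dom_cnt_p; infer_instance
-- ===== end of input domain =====

-- B replaces A's row-major single pass (test each row against the whole pattern, with break and
-- counter-decrement) by column-major elimination: a survivor-index list refined one pattern column
-- at a time; equivalence is proved on all inputs where A raises no IndexError.

-- ===== PORT A =====
-- inner 'for j in range(len(p_index))' loop with break; returns A's 'temp' flag
def cntPInnerA (fea t : List String) (p_index : List Int) : List Int → Bool
  | [] => true
  | j :: js =>
    if PySem.List.pyGetD t (PySem.List.pyGetD p_index j 0) "" ≠ PySem.List.pyGetD fea j ""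
    then false
    else cntPInnerA fea t p_index js

-- one iteration of A's outer loop over rows (state = (p_num, s_num))
def cntPStepA (fea : List String) (p_index : List Int) (s_index : Int) (acc : Int × Int) (t : List String) : Int × Int :=
  let p_num := acc.1 + 1
  let temp := cntPInnerA fea t p_index (PySem.List.pyRange 0 p_index.length 1)
  let p_num := if temp then p_num else p_num - 1
  let s_num := if temp ∧ PySem.List.pyGetD t s_index "" = "1" then acc.2 + 1 else acc.2
  (p_num, s_num)

def cnt_p (fea : List String) (TrainData : List (List String)) (p_index : List Int) (s_index : Int) : Int × Int :=
  let res := TrainData.foldl (cntPStepA fea p_index s_index) (0, 0)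
  (res.2, res.1)

-- ===== PORT B =====
-- one column step: 'survivors = [i for i in survivors if TrainData[i][p_index[j]] == fea[j]]'
def cntPColStep (fea : List String) (TrainData : List (List String)) (p_index : List Int) (surv : List Nat) (j : Int) : List Nat :=
  surv.filter (fun i =>
    PySem.List.pyGetD (TrainData.getD i []) (PySem.List.pyGetD p_index j 0) "" == PySem.List.pyGetD fea j "")

def cnt_p_alt (fea : List String) (TrainData : List (List String)) (p_index : List Int) (s_index : Int) : Int × Int :=
  let survivors := (PySem.List.pyRange 0 p_index.length 1).foldl
    (cntPColStep fea TrainData p_index) (List.range TrainData.length)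
  let p_num : Int := survivors.length
  let s_num : Int :=
    survivors.foldl (fun s i => if PySem.List.pyGetD (TrainData.getD i []) s_index "" == "1" then s + 1 else s) 0
  (s_num, p_num)

-- ===== PRECONDITION & SPEC =====
-- access at pattern position j of row t is in range (both for t and for fea)
def pvOkAt (fea t : List String) (p_index : List Int) (j : Nat) : Prop :=
  PySem.Raise.InRange t.length (p_index.getD j 0) ∧ j < fea.length

-- the access at position j is in range and the compared strings are equal
def pvMatchAt (fea t : List String) (p_index : List Int) (j : Nat) : Prop :=
  pvOkAt fea t p_index j ∧ PySem.List.pyGetD t (p_index.getD j 0) "" = fea.getD j ""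

-- Pre_ holds exactly when Python A raises no IndexError: in every row, each pattern access reached
-- after a fully matching prefix is in range, and the success column is in range for fully matching rows.
def Pre_cnt_p (fea : List String) (TrainData : List (List String)) (p_index : List Int) (s_index : Int) : Prop :=
  ∀ t ∈ TrainData,
    ((∀ j < p_index.length, (∀ j' < j, pvMatchAt fea t p_index j') → pvOkAt fea t p_index j) ∧
     ((∀ j < p_index.length, pvMatchAt fea t p_index j) → PySem.Raise.InRange t.length s_index))

instance (fea : List String) (TrainData : List (List String)) (p_index : List Int) (s_index : Int) : Decidable (Pre_cnt_p fea TrainData p_index s_index) := by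
  unfold Pre_cnt_p pvMatchAt pvOkAt; infer_instance

def pvWitness_cnt_p : List String × List (List String) × List Int × Int :=
  (["1", "0"], [["1", "0", "1"], ["1", "1", "0"], ["0", "0", "1"]], [0, 1], 2)

def Spec_cnt_p (fea : List String) (TrainData : List (List String)) (p_index : List Int) (s_index : Int) (out : Int × Int) : Prop := out = cnt_p_alt fea TrainData p_index s_index
instance (fea : List String) (TrainData : List (List String)) (p_index : List Int) (s_index : Int) (out : Int × Int) : Decidable (Spec_cnt_p fea TrainData p_index s_index out) := by unfold Spec_cnt_p; infer_instance

-- ===== CLAIM (what is proved, stated in full; the proofs are below) =====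
def Claim_equal_cnt_p : Prop := ∀ (fea : List String) (TrainData : List (List String)) (p_index : List Int) (s_index : Int), Dom_cnt_p fea TrainData p_index s_index → Pre_cnt_p fea TrainData p_index s_index → Spec_cnt_p fea TrainData p_index s_index (cnt_p fea TrainData p_index s_index)

-- ===== LEMMAS AND PROOFS =====

-- the row-t match predicate both sides decide (in different traversal orders)
def cntPMatch (fea t : List String) (p_index : List Int) : Bool :=
  (PySem.List.pyRange 0 p_index.length 1).all
    (fun j => PySem.List.pyGetD t (PySem.List.pyGetD p_index j 0) "" == PySem.List.pyGetD fea j "")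

-- A's break-loop computes cntPMatch
theorem cntPInnerA_eq_match (fea t : List String) (p_index : List Int) :
    ∀ js : List Int, cntPInnerA fea t p_index js =
      js.all (fun j => PySem.List.pyGetD t (PySem.List.pyGetD p_index j 0) "" == PySem.List.pyGetD fea j "") := by
  intro js
  induction js with
  | nil => rfl
  | cons j js ih =>
    by_cases h : PySem.List.pyGetD t (PySem.List.pyGetD p_index j 0) "" = PySem.List.pyGetD fea j ""
    · simp [cntPInnerA, h, ih]
    · simp [cntPInnerA, h]

-- A's fold accumulates the two row-major filter-lengths
theorem cnt_p_foldl (fea : List String) (p_index : List Int) (s_index : Int) :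
    ∀ (rows : List (List String)) (p s : Int),
      rows.foldl (cntPStepA fea p_index s_index) (p, s) =
      (p + ((rows.filter (fun t => cntPMatch fea t p_index)).length : Int),
       s + (((rows.filter (fun t => cntPMatch fea t p_index)).filter
              (fun t => PySem.List.pyGetD t s_index "" == "1")).length : Int)) := by
  intro rows
  induction rows with
  | nil => intro p s; simp
  | cons t rows ih =>
    intro p s
    rw [List.foldl_cons]
    have htemp : cntPInnerA fea t p_index (PySem.List.pyRange 0 p_index.length 1) =
        cntPMatch fea t p_index := cntPInnerA_eq_match fea t p_index _
    by_cases hm : cntPMatch fea t p_index = true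
    · by_cases hs : PySem.List.pyGetD t s_index "" = "1"
      · have hstep : cntPStepA fea p_index s_index (p, s) t = (p + 1, s + 1) := by
          simp only [cntPStepA, htemp, hm, hs]; simp
        rw [hstep, ih]
        refine Prod.ext ?_ ?_ <;> simp [hm, hs] <;> ring
      · have hstep : cntPStepA fea p_index s_index (p, s) t = (p + 1, s) := by
          simp only [cntPStepA, htemp, hm]; simp [hs]
        rw [hstep, ih]
        refine Prod.ext ?_ ?_ <;> simp [hm, hs]
        ring
    · have hstep : cntPStepA fea p_index s_index (p, s) t = (p, s) := by
        simp only [cntPStepA, htemp, hm]; simp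
      rw [hstep, ih]
      refine Prod.ext ?_ ?_ <;> simp [hm]

-- a left fold of filters is one filter by the conjunction
theorem foldl_filter_all (f : Int → Nat → Bool) :
    ∀ (js : List Int) (l : List Nat),
      js.foldl (fun s j => s.filter (f j)) l = l.filter (fun i => js.all (fun j => f j i)) := by
  intro js
  induction js with
  | nil => intro l; simp
  | cons j js ih =>
    intro l
    rw [List.foldl_cons, ih, List.filter_filter]
    apply List.filter_congr
    intro i _
    simp [Bool.and_comm]

-- filtering indices of range by P∘getD has the same length as filtering the list by P
theorem length_filter_range (P : List String → Bool) (l : List (List String)) :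
    ((List.range l.length).filter (fun i => P (l.getD i []))).length = (l.filter P).length := by
  have hmap : (List.range l.length).map (fun i => l.getD i []) = l := by
    apply List.ext_getElem
    · simp
    · intro i h1 h2
      simp [List.getD_eq_getElem?_getD, List.getElem?_eq_getElem h2]
  conv_rhs => rw [← hmap]
  rw [← List.countP_eq_length_filter, ← List.countP_eq_length_filter, List.countP_map]
  rfl

-- B's success-count fold is a filter length
theorem foldl_count_filter (g : Nat → Bool) :
    ∀ (l : List Nat) (s : Int),
      l.foldl (fun s i => if g i then s + 1 else s) s = s + ((l.filter g).length : Int) := by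
  intro l
  induction l with
  | nil => intro s; simp
  | cons i l ih =>
    intro s
    by_cases h : g i
    · simp [h, ih]; ring
    · simp [h, ih]

-- ===== VERDICT (by name: the statement is the Claim_ definition above) =====
theorem cnt_p_spec : Claim_equal_cnt_p := by
  intro fea TrainData p_index s_index _ _
  show cnt_p fea TrainData p_index s_index = cnt_p_alt fea TrainData p_index s_index
  rw [cnt_p, cnt_p_alt, cnt_p_foldl fea p_index s_index TrainData 0 0]
  rw [show (cntPColStep fea TrainData p_index) = (fun s j => s.filter (fun i =>
        PySem.List.pyGetD (TrainData.getD i []) (PySem.List.pyGetD p_index j 0) "" == PySem.List.pyGetD fea j "")) from rfl,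
      foldl_filter_all, foldl_count_filter]
  have h1 := length_filter_range (fun t => cntPMatch fea t p_index) TrainData
  have h2 := length_filter_range
    (fun t => PySem.List.pyGetD t s_index "" == "1" && cntPMatch fea t p_index) TrainData
  simp only [List.filter_filter]
  simp only [cntPMatch] at h1 h2 ⊢
  refine Prod.ext ?_ ?_ <;> simp only []
  · rw [h2]
  · rw [h1]; ring
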